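-- pv_equiv track=rewrite | github.com/johnzhang1999/261lab2 | microbiome_test.py | mergeLoc
-- ===== SOURCE A (Python) =====
-- from collections import Counter
--
-- def mergeLoc(raw, loc_dict):
--     result = {}
--     for loc_i, phylum_count_dict in raw.items():
--         loc = loc_dict[loc_i][0]
--         if not loc in result:
--             result[loc] = Counter({})
--         result[loc] += Counter(phylum_count_dict)
--     return result
-- ===== SOURCE B (Python) =====
-- from collections import Counter
--
-- def mergeLoc(raw, loc_dict):
--     # distinct resolved locations in first-occurrence order
--     locs = []
--     for loc_i in raw:
--         loc = loc_dict[loc_i][0]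
--         if loc not in locs:
--             locs.append(loc)
--     # for each location, rescan raw and sum the matching phylum dicts
--     return {loc: sum((Counter(d) for i, d in raw.items()
--                       if loc_dict[i][0] == loc), Counter())
--             for loc in locs}
-- ===== Notes on version B (the rewrite author's own statement) =====
-- stated objective: alternative
-- what changed: A makes one pass accumulating Counters into a result dict keyed by location; B uses no accumulator dict at all: it first lists the distinct resolved locations, then for each location rescans raw and sums the matching dicts with Counter addition (a nested-scan strategy, O(L*N) instead of O(N)).
import Mathlib
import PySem

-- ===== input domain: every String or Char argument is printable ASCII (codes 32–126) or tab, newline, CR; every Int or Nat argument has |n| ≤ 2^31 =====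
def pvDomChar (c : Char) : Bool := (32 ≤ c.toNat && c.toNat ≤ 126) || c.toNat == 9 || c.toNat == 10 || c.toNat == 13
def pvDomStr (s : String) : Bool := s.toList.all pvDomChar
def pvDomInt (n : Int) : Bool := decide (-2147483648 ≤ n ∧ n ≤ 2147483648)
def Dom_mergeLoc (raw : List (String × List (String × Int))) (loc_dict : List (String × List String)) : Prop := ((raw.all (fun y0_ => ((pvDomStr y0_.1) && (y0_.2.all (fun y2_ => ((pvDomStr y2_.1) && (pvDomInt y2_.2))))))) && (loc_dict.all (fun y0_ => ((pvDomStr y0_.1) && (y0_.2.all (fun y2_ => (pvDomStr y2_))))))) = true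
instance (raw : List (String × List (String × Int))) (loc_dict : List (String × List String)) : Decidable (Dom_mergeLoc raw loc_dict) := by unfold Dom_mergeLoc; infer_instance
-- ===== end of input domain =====

-- B drops A's accumulator dict entirely: it lists the distinct resolved locations, then for
-- each location rescans raw and sums the matching dicts with Counter addition (nested scans);
-- objective: alternative strategy, O(L*N) instead of A's O(N).

-- ===== PORT A =====
-- both Pythons compute loc_dict[loc_i][0]; "" stands for the KeyError/IndexError case, excluded by Pre_
def pvLoc (loc_dict : List (String × List String)) (k : String) : String :=
  match (PySem.Dict.mk loc_dict).get? k with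
  | some (x :: _) => x
  | _ => ""

-- Counter.__iadd__: self[elem] = self.get(elem, 0) + count for elem in other, in order
def pvIAdd (c d : List (String × Int)) : List (String × Int) :=
  (d.foldl (fun (acc : PySem.Dict String Int) p => acc.insert p.1 (acc.getD p.1 0 + p.2))
    (PySem.Dict.mk c)).items

-- Counter._keep_positive: delete the entries with count ≤ 0, keeping the order of the rest
def pvKeepPos (c : List (String × Int)) : List (String × Int) :=
  c.filter (fun p => decide (0 < p.2))

def mergeLoc (raw : List (String × List (String × Int))) (loc_dict : List (String × List String)) : List (String × List (String × Int)) :=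
  (raw.foldl
    (fun (result : PySem.Dict String (List (String × Int))) p =>
      let loc := pvLoc loc_dict p.1
      let result := if result.contains loc then result else result.insert loc []
      result.insert loc (pvKeepPos (pvIAdd (result.getD loc []) p.2)))
    PySem.Dict.empty).items

-- ===== PORT B =====
-- Counter.__add__: positive-updated entries of self in order, then the positive fresh entries of other
def pvCounterAdd (c d : List (String × Int)) : List (String × Int) :=
  c.filterMap (fun p =>
      let n := p.2 + (PySem.Dict.mk d).getD p.1 0
      if 0 < n then some (p.1, n) else none)
  ++ d.filter (fun q => !(PySem.Dict.mk c).contains q.1 && decide (0 < q.2))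

-- pass 1: distinct resolved locations in first-occurrence order (list with membership test);
-- pass 2: for each location, rescan raw and sum the matching dicts with Counter addition
def mergeLoc_alt (raw : List (String × List (String × Int))) (loc_dict : List (String × List String)) : List (String × List (String × Int)) :=
  let locs : PySem.Set String :=
    raw.foldl (fun ls p => PySem.Set.add ls (pvLoc loc_dict p.1)) PySem.Set.empty
  locs.map (fun loc =>
    (loc, ((raw.filter (fun p => pvLoc loc_dict p.1 == loc)).map (·.2)).foldl pvCounterAdd []))

-- ===== PRECONDITION & SPEC =====
-- Pre_ excludes inputs where A raises (a loc index missing from loc_dict or mapped to an empty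
-- list: KeyError/IndexError), and assoc-list encodings of the inner phylum dicts with duplicate
-- keys, which no Python dict input produces.
def Pre_mergeLoc (raw : List (String × List (String × Int))) (loc_dict : List (String × List String)) : Prop :=
  ∀ p ∈ raw, (PySem.Dict.mk loc_dict).getD p.1 [] ≠ [] ∧ (p.2.map Prod.fst).Nodup
instance (raw : List (String × List (String × Int))) (loc_dict : List (String × List String)) : Decidable (Pre_mergeLoc raw loc_dict) := by unfold Pre_mergeLoc; infer_instance

def pvWitness_mergeLoc : (List (String × List (String × Int))) × (List (String × List String)) :=
  ([("i1", [("a", 2), ("b", 1)]), ("i2", [("a", -2)])], [("i1", ["L", "x"]), ("i2", ["L"])])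

def Spec_mergeLoc (raw : List (String × List (String × Int))) (loc_dict : List (String × List String)) (out : List (String × List (String × Int))) : Prop := out = mergeLoc_alt raw loc_dict
instance (raw : List (String × List (String × Int))) (loc_dict : List (String × List String)) (out : List (String × List (String × Int))) : Decidable (Spec_mergeLoc raw loc_dict out) := by unfold Spec_mergeLoc; infer_instance

-- ===== CLAIM (what is proved, stated in full; the proofs are below) =====
def Claim_equal_mergeLoc : Prop := ∀ (raw : List (String × List (String × Int))) (loc_dict : List (String × List String)), Dom_mergeLoc raw loc_dict → Pre_mergeLoc raw loc_dict → Spec_mergeLoc raw loc_dict (mergeLoc raw loc_dict)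

-- ===== LEMMAS AND PROOFS =====

theorem pv_iadd_items (d : List (String × Int)) (c : PySem.Dict String Int)
    (hc : c.keys.Nodup) (hd : (d.map Prod.fst).Nodup) :
    (d.foldl (fun acc p => acc.insert p.1 (acc.getD p.1 0 + p.2)) c).items
      = c.items.map (fun p => (p.1, p.2 + (PySem.Dict.mk d).getD p.1 0))
        ++ d.filter (fun q => !c.contains q.1) := by
  induction d generalizing c with
  | nil => simp [PySem.Dict.getD, PySem.Dict.get?]
  | cons q d ih =>
      obtain ⟨qk, qv⟩ := q
      rw [List.map_cons] at hd
      have hnd := List.nodup_cons.mp hd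
      have hq : qk ∉ d.map Prod.fst := hnd.1
      have hcond : (PySem.Dict.mk d).contains qk = false := by
        cases hb : (PySem.Dict.mk d).contains qk with
        | false => rfl
        | true => exact absurd (by simpa using (PySem.Dict.contains_iff_mem_keys _ _).mp hb) hq
      have hmkd : (PySem.Dict.mk d).getD qk 0 = 0 :=
        PySem.Dict.getD_of_not_contains _ _ hcond
      have hcons : ∀ x, (PySem.Dict.mk ((qk, qv) :: d)).getD x 0
          = if qk = x then qv else (PySem.Dict.mk d).getD x 0 := by
        intro x
        rw [PySem.Dict.getD_eq_get?_getD, PySem.Dict.get?_mk_cons]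
        by_cases h : qk = x <;> simp [h, PySem.Dict.getD_eq_get?_getD]
      simp only [List.foldl_cons]
      rw [ih _ (PySem.Dict.nodup_keys_insert _ _ _ hc) hnd.2]
      by_cases hcq : c.contains qk
      · rw [PySem.Dict.items_insert, if_pos hcq, List.map_map]
        have h1 : ∀ p ∈ c.items,
            ((fun p => (p.1, p.2 + (PySem.Dict.mk d).getD p.1 0)) ∘
              (fun p => if (p.1 == qk) = true then (qk, c.getD qk 0 + qv) else p)) p
            = (p.1, p.2 + (PySem.Dict.mk ((qk, qv) :: d)).getD p.1 0) := by
          intro p hp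
          by_cases hpq : p.1 = qk
          · have hval : c.getD qk 0 = p.2 := by
              have hmem : (qk, p.2) ∈ c.items := by rw [← hpq]; exact hp
              exact PySem.Dict.getD_of_mem_items _ hmem hc 0
            simp [Function.comp, hpq, hcons, hval, hmkd]
          · simp [Function.comp, hpq, hcons, Ne.symm hpq]
        rw [List.map_congr_left h1]
        have h2 : d.filter (fun x => !(c.insert qk (c.getD qk 0 + qv)).contains x.1)
            = d.filter (fun x => !c.contains x.1) := by
          apply List.filter_congr
          intro x hx
          rw [PySem.Dict.contains_insert]
          by_cases hxq : x.1 = qk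
          · simp [hxq, hcq]
          · simp [hxq]
        rw [h2, List.filter_cons, if_neg (by simp [hcq])]
      · rw [PySem.Dict.items_insert, if_neg (by simp [hcq]), List.map_append]
        have hc0 : c.getD qk 0 = 0 :=
          PySem.Dict.getD_of_not_contains _ _ (by simpa using hcq)
        have hqk : qk ∉ c.items.map Prod.fst := by
          intro hmem
          have hkc : qk ∈ c.keys := by
            simp only [PySem.Dict.keys]; exact hmem
          exact (by simpa using hcq : ¬ c.contains qk = true)
            ((PySem.Dict.contains_iff_mem_keys _ _).mpr hkc)
        have h1 : ∀ p ∈ c.items,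
            (p.1, p.2 + (PySem.Dict.mk d).getD p.1 0)
            = (p.1, p.2 + (PySem.Dict.mk ((qk, qv) :: d)).getD p.1 0) := by
          intro p hp
          have hne : qk ≠ p.1 := fun h => hqk (h ▸ List.mem_map_of_mem hp)
          simp [hcons, hne]
        rw [List.map_congr_left h1]
        have h2 : d.filter (fun x => !(c.insert qk (c.getD qk 0 + qv)).contains x.1)
            = d.filter (fun x => !c.contains x.1) := by
          apply List.filter_congr
          intro x hx
          rw [PySem.Dict.contains_insert]
          have hne : x.1 ≠ qk := fun h => hq (h ▸ List.mem_map_of_mem hx)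
          simp [hne]
        rw [h2, List.filter_cons, if_pos (by simp [hcq])]
        simp [hcons, hc0, hmkd]

theorem pv_filterMap_ite {α β : Type} (c : List α) (P : α → Prop) [DecidablePred P] (f : α → β) :
    c.filterMap (fun a => if P a then some (f a) else none)
      = (c.filter (fun a => decide (P a))).map f := by
  induction c with
  | nil => rfl
  | cons a c ih => by_cases h : P a <;> simp [h, ih]

theorem pv_step_eq_counterAdd (c d : List (String × Int))
    (hc : (c.map Prod.fst).Nodup) (hd : (d.map Prod.fst).Nodup) :
    pvKeepPos (pvIAdd c d) = pvCounterAdd c d := by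
  unfold pvKeepPos pvIAdd pvCounterAdd
  rw [pv_iadd_items d (PySem.Dict.mk c) (by simpa [PySem.Dict.keys] using hc) hd]
  rw [List.filter_append, List.filter_map,
    pv_filterMap_ite c (fun p => 0 < p.2 + (PySem.Dict.mk d).getD p.1 0)
      (fun p => (p.1, p.2 + (PySem.Dict.mk d).getD p.1 0)),
    List.filter_filter]
  congr 1
  simp [Bool.and_comm]

theorem pv_counterAdd_nodup (c d : List (String × Int))
    (hc : (c.map Prod.fst).Nodup) (hd : (d.map Prod.fst).Nodup) :
    ((pvCounterAdd c d).map Prod.fst).Nodup := by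
  unfold pvCounterAdd
  rw [pv_filterMap_ite c (fun p => 0 < p.2 + (PySem.Dict.mk d).getD p.1 0)
      (fun p => (p.1, p.2 + (PySem.Dict.mk d).getD p.1 0))]
  rw [List.map_append, List.map_map, List.nodup_append]
  refine ⟨?_, ?_, ?_⟩
  · have hsub := (List.filter_sublist
      (p := fun p => decide (0 < p.2 + (PySem.Dict.mk d).getD p.1 0)) (l := c)).map Prod.fst
    exact List.Sublist.nodup (by simpa using hsub) hc
  · have hsub := (List.filter_sublist
      (p := fun q => !(PySem.Dict.mk c).contains q.1 && decide (0 < q.2)) (l := d)).map Prod.fst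
    exact hsub.nodup hd
  · intro x hx y hy heq
    obtain ⟨p, hp, hpx⟩ := List.mem_map.mp hx
    obtain ⟨w, hw, hwx⟩ := List.mem_map.mp hy
    have hpc : p.1 ∈ c.map Prod.fst := List.mem_map_of_mem (List.mem_of_mem_filter hp)
    have hwd := (List.mem_filter.mp hw).2
    simp only [Bool.and_eq_true] at hwd
    have hb := hwd.1
    rw [Bool.not_eq_true'] at hb
    have hmem : w.1 ∈ c.map Prod.fst := by
      have hwp : w.1 = p.1 := by rw [hwx, ← heq, ← hpx]; rfl
      rw [hwp]; exact hpc
    have hct : (PySem.Dict.mk c).contains w.1 = true :=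
      (PySem.Dict.contains_iff_mem_keys _ _).mpr (by simpa using hmem)
    rw [hb] at hct
    exact Bool.false_ne_true hct

theorem pv_foldl_step_eq (ds : List (List (String × Int)))
    (h : ∀ d ∈ ds, (d.map Prod.fst).Nodup) :
    ∀ c, (c.map Prod.fst).Nodup →
      ds.foldl (fun c d => pvKeepPos (pvIAdd c d)) c = ds.foldl pvCounterAdd c := by
  induction ds with
  | nil => intro c _; rfl
  | cons d ds ih =>
      intro c hcn
      have hd := h d (List.mem_cons_self ..)
      simp only [List.foldl_cons, pv_step_eq_counterAdd c d hcn hd]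
      exact ih (fun x hx => h x (List.mem_cons_of_mem _ hx)) _ (pv_counterAdd_nodup c d hcn hd)

theorem pv_bodyA_eq (ld : List (String × List String))
    (r : PySem.Dict String (List (String × Int))) (p : String × List (String × Int)) :
    (let loc := pvLoc ld p.1
     let r1 := if r.contains loc then r else r.insert loc []
     r1.insert loc (pvKeepPos (pvIAdd (r1.getD loc []) p.2)))
      = r.insert (pvLoc ld p.1) (pvKeepPos (pvIAdd (r.getD (pvLoc ld p.1) []) p.2)) := by
  by_cases h : r.contains (pvLoc ld p.1)
  · simp [h]
  · simp only [h, if_neg Bool.false_ne_true]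
    rw [PySem.Dict.getD_insert, if_pos rfl, PySem.Dict.insert_insert_self,
      PySem.Dict.getD_of_not_contains _ _ (by simpa using h)]

theorem pv_A_getD (ld : List (String × List String))
    (l : List (String × List (String × Int))) :
    ∀ (r : PySem.Dict String (List (String × Int))) (k : String),
      (l.foldl (fun r p => r.insert (pvLoc ld p.1) (pvKeepPos (pvIAdd (r.getD (pvLoc ld p.1) []) p.2))) r).getD k []
        = ((l.filter (fun p => pvLoc ld p.1 == k)).map (·.2)).foldl
            (fun c d => pvKeepPos (pvIAdd c d)) (r.getD k []) := by
  induction l with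
  | nil => intro r k; rfl
  | cons p l ih =>
      intro r k
      by_cases h : pvLoc ld p.1 = k
      · subst h
        simp only [List.foldl_cons, ih]
        simp
      · simp only [List.foldl_cons, ih]
        simp [h, Ne.symm h, PySem.Dict.getD_insert]

theorem pv_main (raw : List (String × List (String × Int))) (ld : List (String × List String))
    (hpre : ∀ p ∈ raw, (p.2.map Prod.fst).Nodup) :
    mergeLoc raw ld = mergeLoc_alt raw ld := by
  unfold mergeLoc mergeLoc_alt
  have hfA : (fun (result : PySem.Dict String (List (String × Int))) (p : String × List (String × Int)) =>
      let loc := pvLoc ld p.1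
      let result := if result.contains loc then result else result.insert loc []
      result.insert loc (pvKeepPos (pvIAdd (result.getD loc []) p.2)))
      = fun result p => result.insert (pvLoc ld p.1) (pvKeepPos (pvIAdd (result.getD (pvLoc ld p.1) []) p.2)) := by
    funext r p; exact pv_bodyA_eq ld r p
  rw [hfA]
  -- A's result keys are the distinct locations in first-occurrence order — B's pass 1
  have hAnodup := PySem.Dict.nodup_keys_foldl_insert_key raw (fun p => pvLoc ld p.1)
    (fun r p => pvKeepPos (pvIAdd (r.getD (pvLoc ld p.1) []) p.2)) PySem.Dict.empty
    PySem.Dict.nodup_keys_empty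
  have hAkeys := PySem.Dict.keys_foldl_insert_key raw (fun p => pvLoc ld p.1)
    (fun r p => pvKeepPos (pvIAdd (r.getD (pvLoc ld p.1) []) p.2)) PySem.Dict.empty
  rw [PySem.Dict.keys_empty, PySem.Set.update_nil_left, PySem.Set.ofList,
    List.foldl_map] at hAkeys
  rw [PySem.Dict.items_eq_map_keys _ hAnodup [], hAkeys]
  apply List.map_congr_left
  intro k _
  -- A's value at k equals B's rescan-and-sum value at k
  rw [pv_A_getD ld raw PySem.Dict.empty k]
  have hds : ∀ d ∈ (raw.filter (fun p => pvLoc ld p.1 == k)).map (·.2),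
      (d.map Prod.fst).Nodup := by
    intro d hd
    obtain ⟨p, hp, hpd⟩ := List.mem_map.mp hd
    exact hpd ▸ hpre p (List.mem_of_mem_filter hp)
  rw [PySem.Dict.getD_empty, pv_foldl_step_eq _ hds [] (by simp)]

-- ===== VERDICT (by name: the statement is the Claim_ definition above) =====
theorem mergeLoc_spec : Claim_equal_mergeLoc := by
  intro raw loc_dict _hdom hpre
  unfold Spec_mergeLoc
  exact pv_main raw loc_dict (fun p hp => (hpre p hp).2)
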